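-- pv_equiv track=rewrite | github.com/Cris1928/-MIA-Proyecto1_202107190 | [MIA]T2_202107190/main.py | ComandoAEjecutar
-- ===== SOURCE A (Python) =====
-- def ComandoAEjecutar (Line_comand):
--     m_token = ""
--     Fin = False
--     for caracter in Line_comand:
--         if Fin:
--             if caracter == ' ' or caracter == '-':
--                 break
--             m_token += caracter
--         elif caracter != ' ' and not Fin:
--             if caracter == '#':
--                 m_token = Line_comand
--                 break
--             else:
--                 m_token += caracter
--                 Fin = True
--     return m_token
-- ===== SOURCE B (Python) =====
-- def ComandoAEjecutar(Line_comand):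
--     n = len(Line_comand)
--     start = next((i for i, c in enumerate(Line_comand) if c != ' '), n)
--     if start == n:
--         return ""
--     if Line_comand[start] == '#':
--         return Line_comand
--     cut = next((j for j, c in enumerate(Line_comand[start + 1:]) if c == ' ' or c == '-'),
--                n - start - 1)
--     return Line_comand[start : start + 1 + cut]
-- ===== Notes on version B (the rewrite author's own statement) =====
-- stated objective: alternative
-- what changed: Replaced A's accumulating per-character boolean state machine by pure index arithmetic: find the token's start index and its cut offset with enumerate/next generator searches, then return a single slice of the original string; no character-by-character token building and no mutable Fin flag.
import Mathlib
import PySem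

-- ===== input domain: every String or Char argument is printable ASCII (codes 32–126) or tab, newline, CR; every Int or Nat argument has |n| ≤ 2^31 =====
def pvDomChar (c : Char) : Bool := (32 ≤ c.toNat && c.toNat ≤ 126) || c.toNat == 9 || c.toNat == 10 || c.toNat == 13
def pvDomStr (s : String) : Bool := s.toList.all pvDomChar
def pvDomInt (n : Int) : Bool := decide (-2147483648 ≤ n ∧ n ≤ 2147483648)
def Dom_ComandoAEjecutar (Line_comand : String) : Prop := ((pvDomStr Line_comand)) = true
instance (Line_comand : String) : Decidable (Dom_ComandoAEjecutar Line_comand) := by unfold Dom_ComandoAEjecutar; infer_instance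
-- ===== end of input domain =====

-- B replaces A's accumulating per-character state machine by index arithmetic: locate the
-- token's start and cut indices with enumerate/next, then return one slice (objective: alternative).

-- ===== PORT A =====
-- A's for-loop with break, state (m_token, Fin); `Line` is the whole original string for the '#' branch.
def ComandoAEjecutarLoop (Line : String) (m_token : List Char) (Fin : Bool) : List Char → String
  | [] => String.ofList m_token
  | caracter :: rest =>
    if Fin then
      if caracter = ' ' ∨ caracter = '-' then String.ofList m_token
      else ComandoAEjecutarLoop Line (m_token ++ [caracter]) Fin rest
    else if caracter ≠ ' ' then
      if caracter = '#' then Line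
      else ComandoAEjecutarLoop Line (m_token ++ [caracter]) true rest
    else ComandoAEjecutarLoop Line m_token Fin rest

def ComandoAEjecutar (Line_comand : String) : String :=
  ComandoAEjecutarLoop Line_comand [] false Line_comand.toList

-- ===== PORT B =====
-- Source B: start = next((i for i, c in enumerate(L) if c != ' '), n); if start == n: '' ;
-- if L[start] == '#': L ; cut = next((j for j, c in enumerate(L[start+1:]) if c==' ' or c=='-'), n-start-1);
-- return L[start : start+1+cut].  The generator-with-default `next` is ported as find? on the
-- enumerate list (first pair satisfying the condition), keeping the pair (index, char).
def ComandoAEjecutar_alt (Line_comand : String) : String :=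
  let cs := Line_comand.toList
  let n : Int := cs.length
  match (PySem.List.enumerate cs 0).find? (fun p => p.2 ≠ ' ') with
  | none => ""
  | some (start, c) =>
    if c = '#' then Line_comand
    else
      let rest := PySem.List.slice cs (some (start + 1)) none
      let cut : Int :=
        (((PySem.List.enumerate rest 0).find? (fun p => p.2 = ' ' ∨ p.2 = '-')).map (·.1)).getD
          (n - start - 1)
      String.ofList (PySem.List.slice cs (some start) (some (start + 1 + cut)))

-- ===== PRECONDITION & SPEC =====
def Spec_ComandoAEjecutar (Line_comand : String) (out : String) : Prop := out = ComandoAEjecutar_alt Line_comand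
instance (Line_comand : String) (out : String) : Decidable (Spec_ComandoAEjecutar Line_comand out) := by unfold Spec_ComandoAEjecutar; infer_instance

-- ===== CLAIM (what is proved, stated in full; the proofs are below) =====
def Claim_equal_ComandoAEjecutar : Prop := ∀ (Line_comand : String), Dom_ComandoAEjecutar Line_comand → Spec_ComandoAEjecutar Line_comand (ComandoAEjecutar Line_comand)

-- ===== LEMMAS AND PROOFS =====

-- find? over enumerate = head of dropWhile, with its index = length of takeWhile.
theorem enumFind_not_space (cs : List Char) (s : Int) :
    (PySem.List.enumerate cs s).find? (fun p => p.2 ≠ ' ') =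
      (cs.dropWhile (· = ' ')).head?.map
        (fun c => (s + ((cs.takeWhile (· = ' ')).length : Int), c)) := by
  induction cs generalizing s with
  | nil => simp [PySem.List.enumerate_nil]
  | cons c cs ih =>
    rw [PySem.List.enumerate_cons]
    by_cases h : c = ' '
    · rw [List.find?_cons_of_neg (by simp [h]), ih (s + 1),
        List.dropWhile_cons_of_pos (by simp [h]), List.takeWhile_cons_of_pos (by simp [h])]
      cases (cs.dropWhile (· = ' ')).head? <;> simp <;> ring_nf
    · rw [List.find?_cons_of_pos (by simp [h]),
        List.dropWhile_cons_of_neg (by simp [h]), List.takeWhile_cons_of_neg (by simp [h])]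
      simp

theorem enumFind_stop (rest : List Char) (s : Int) :
    (PySem.List.enumerate rest s).find? (fun p => p.2 = ' ' ∨ p.2 = '-') =
      (rest.dropWhile (fun d => ¬(d = ' ' ∨ d = '-'))).head?.map
        (fun c => (s + ((rest.takeWhile (fun d => ¬(d = ' ' ∨ d = '-'))).length : Int), c)) := by
  induction rest generalizing s with
  | nil => simp [PySem.List.enumerate_nil]
  | cons c cs ih =>
    rw [PySem.List.enumerate_cons]
    by_cases h : c = ' ' ∨ c = '-'
    · rw [List.find?_cons_of_pos (by rcases h with h | h <;> simp [h]),
        List.dropWhile_cons_of_neg (by rcases h with h | h <;> simp [h]),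
        List.takeWhile_cons_of_neg (by rcases h with h | h <;> simp [h])]
      simp
    · rw [List.find?_cons_of_neg (by simpa using h), ih (s + 1),
        List.dropWhile_cons_of_pos (by simpa using h),
        List.takeWhile_cons_of_pos (by simpa using h)]
      cases (cs.dropWhile (fun d => ¬(d = ' ' ∨ d = '-'))).head? <;> simp <;> ring_nf

-- B's cut (with its not-found default, stated abstractly) is the takeWhile length of the rest.
theorem cut_eq (rest : List Char) (d : Int) (hd : d = (rest.length : Int)) :
    ((((PySem.List.enumerate rest 0).find? (fun p => p.2 = ' ' ∨ p.2 = '-')).map (·.1)).getD d) =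
      ((rest.takeWhile (fun d => ¬(d = ' ' ∨ d = '-'))).length : Int) := by
  rw [enumFind_stop]
  cases hnil : rest.dropWhile (fun d => ¬(d = ' ' ∨ d = '-')) with
  | cons a l => simp
  | nil =>
    have htw : rest.takeWhile (fun d => ¬(d = ' ' ∨ d = '-')) = rest := by
      conv_rhs => rw [← List.takeWhile_append_dropWhile
        (p := fun d => decide (¬(d = ' ' ∨ d = '-'))) (l := rest)]
      rw [hnil, List.append_nil]
    rw [List.head?_nil, Option.map_none, Option.map_none, Option.getD_none, htw]
    exact hd

-- drop past the takeWhile-length = dropWhile.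
theorem drop_takeWhile_len (p : Char → Bool) (cs : List Char) :
    cs.drop (cs.takeWhile p).length = cs.dropWhile p := by
  induction cs with
  | nil => simp
  | cons a l ih =>
    by_cases h : p a
    · simp [List.takeWhile_cons, h, ih]
    · simp [List.takeWhile_cons, h]

-- take of takeWhile-length recovers takeWhile.
theorem take_takeWhile_len (p : Char → Bool) (t : List Char) :
    t.take (t.takeWhile p).length = t.takeWhile p := by
  induction t with
  | nil => simp
  | cons a l ih =>
    by_cases h : p a
    · simp [h, ih]
    · simp [h]

-- A's loop after Fin is set collects exactly takeWhile of the not-stop predicate.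
theorem loop_fin (Line : String) (rest : List Char) :
    ∀ tok, ComandoAEjecutarLoop Line tok true rest =
      String.ofList (tok ++ rest.takeWhile (fun d => ¬(d = ' ' ∨ d = '-'))) := by
  induction rest with
  | nil => intro tok; simp [ComandoAEjecutarLoop]
  | cons c cs ih =>
    intro tok
    by_cases h : c = ' ' ∨ c = '-'
    · simp [ComandoAEjecutarLoop, h]
      rw [List.takeWhile_cons_of_neg (by rcases h with h | h <;> simp [h])]
      simp
    · simp [ComandoAEjecutarLoop, h, ih]
      rw [List.takeWhile_cons_of_pos (by simpa using h)]
    -- the rw's under the simp-normalised predicate forms close the residual goals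

-- Before Fin is set, A's loop skips spaces (dropWhile) then dispatches on the first char.
theorem loop_skip (Line : String) (rest : List Char) :
    ComandoAEjecutarLoop Line [] false rest =
      match rest.dropWhile (· = ' ') with
      | [] => ""
      | c :: cs => if c = '#' then Line else ComandoAEjecutarLoop Line [c] true cs := by
  induction rest with
  | nil => simp [ComandoAEjecutarLoop]
  | cons c cs ih =>
    by_cases hs : c = ' '
    · simpa [ComandoAEjecutarLoop, hs] using ih
    · by_cases hh : c = '#'
      · simp [ComandoAEjecutarLoop, hh]
      · simp [ComandoAEjecutarLoop, hs, hh]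

-- B's final slice, with start/cut in index form, is the first char plus the takeWhile of the rest.
theorem final_slice (cs t : List Char) (c : Char) (k : Nat) (hdct : cs.drop k = c :: t) :
    PySem.List.slice cs (some (k : Int))
        (some ((k : Int) + 1 + ((t.takeWhile (fun d => ¬(d = ' ' ∨ d = '-'))).length : Int))) =
      c :: t.takeWhile (fun d => ¬(d = ' ' ∨ d = '-')) := by
  have harg : ((k : Int) + 1 + ((t.takeWhile (fun d => ¬(d = ' ' ∨ d = '-'))).length : Int))
      = ((k + (1 + (t.takeWhile (fun d => ¬(d = ' ' ∨ d = '-'))).length) : Nat) : Int) := by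
    push_cast; ring
  rw [harg, PySem.List.slice_natCast,
    show k + (1 + (t.takeWhile (fun d => ¬(d = ' ' ∨ d = '-'))).length) - k
      = (t.takeWhile (fun d => ¬(d = ' ' ∨ d = '-'))).length + 1 from by omega,
    hdct, List.take_succ_cons, take_takeWhile_len]

-- ===== VERDICT (by name: the statement is the Claim_ definition above) =====
theorem ComandoAEjecutar_spec : Claim_equal_ComandoAEjecutar := by
  intro L _
  unfold Spec_ComandoAEjecutar ComandoAEjecutar ComandoAEjecutar_alt
  rw [loop_skip]
  dsimp only
  rw [enumFind_not_space]
  set cs := L.toList with hcs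
  set k := (cs.takeWhile (· = ' ')).length with hk
  have hdrop : cs.drop k = cs.dropWhile (· = ' ') := drop_takeWhile_len _ cs
  cases h : cs.dropWhile (· = ' ') with
  | nil => simp
  | cons c t =>
    have hdct : cs.drop k = c :: t := by rw [hdrop, h]
    have hkle : k ≤ cs.length := (List.takeWhile_prefix _).length_le
    have hlen : cs.length = k + 1 + t.length := by
      have := congrArg List.length hdct
      simp [List.length_drop] at this
      omega
    have hrest : PySem.List.slice cs (some ((k : Int) + 1)) none = t := by
      have harg : ((k : Int) + 1) = ((k + 1 : Nat) : Int) := by push_cast; ring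
      rw [harg, PySem.List.slice_from_natCast, ← List.drop_drop, hdct]
      simp
    simp only [Option.map_some, List.head?_cons, zero_add]
    by_cases hh : c = '#'
    · rw [if_pos hh, if_pos hh]
    · rw [if_neg hh, if_neg hh, loop_fin, hrest]
      rw [cut_eq]
      · rw [final_slice cs t c k hdct]
        simp
      · rw [hlen]; push_cast; ring
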